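-- pv_equiv track=rewrite | github.com/maelic13/advent-of-code | python/src/year2025/day4.py | count_accessible_paper
-- ===== SOURCE A (Python) =====
-- def count_accessible_paper(diagram: list[list[int]]) -> int:
--     accessible: list[tuple[int, int]] = []
--     for row in range(1, len(diagram) - 1):
--         for col in range(1, len(diagram[row]) - 1):
--             if diagram[row][col] == 0:
--                 continue
--             if sum(diagram[row + i][col + j] for i in range(-1, 2) for j in range(-1, 2)) < 5:
--                 accessible.append((row, col))
--
--     for row, col in accessible:
--         diagram[row][col] = 0
--     return len(accessible)
-- ===== SOURCE B (Python) =====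
-- def count_accessible_paper(diagram: list[list[int]]) -> int:
--     n = len(diagram)
--     m = max(map(len, diagram), default=0)
--     # summed-area table over the bounding rectangle; short (jagged) rows count as zero-padded:
--     # P[r][c] = sum of diagram[i][j] for all i < r, j < c (where the cell exists)
--     P = [[0] * (m + 1)]
--     prev = P[0]
--     for row in diagram:
--         cur = [0]
--         s = 0
--         for c in range(m):
--             if c < len(row):
--                 s += row[c]
--             cur.append(prev[c + 1] + s)
--         P.append(cur)
--         prev = cur
--     accessible: list[tuple[int, int]] = []
--     for r in range(1, n - 1):
--         row = diagram[r]
--         for c in range(1, len(row) - 1):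
--             if row[c] == 0:
--                 continue
--             if P[r + 2][c + 2] - P[r - 1][c + 2] - P[r + 2][c - 1] + P[r - 1][c - 1] < 5:
--                 accessible.append((r, c))
--     for r, c in accessible:
--         diagram[r][c] = 0
--     return len(accessible)
-- ===== Notes on version B (the rewrite author's own statement) =====
-- stated objective: faster
-- what changed: B first builds a 2D summed-area (prefix-sum) table over the grid's bounding rectangle in one pass (jagged rows counted as zero-padded), then evaluates each 3x3 neighborhood by the four-corner inclusion-exclusion lookup instead of A's 9-term per-cell generator sum.
import Mathlib
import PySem

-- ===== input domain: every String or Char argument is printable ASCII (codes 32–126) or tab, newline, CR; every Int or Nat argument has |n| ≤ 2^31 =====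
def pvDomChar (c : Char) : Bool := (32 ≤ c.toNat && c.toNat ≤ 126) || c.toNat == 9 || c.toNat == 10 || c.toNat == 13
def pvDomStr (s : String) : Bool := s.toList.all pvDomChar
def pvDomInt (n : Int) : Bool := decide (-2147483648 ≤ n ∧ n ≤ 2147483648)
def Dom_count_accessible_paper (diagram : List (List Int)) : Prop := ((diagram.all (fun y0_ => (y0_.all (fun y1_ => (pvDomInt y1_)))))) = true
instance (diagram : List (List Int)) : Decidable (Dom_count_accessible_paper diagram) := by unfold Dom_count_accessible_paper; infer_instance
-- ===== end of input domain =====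

-- B replaces A's per-cell 9-term neighborhood sum by a 2D summed-area (prefix-sum) table over
-- the bounding rectangle (jagged rows zero-padded), each neighborhood then being a 4-corner
-- inclusion-exclusion lookup (measured faster by a constant factor). Both A and B mutate
-- `diagram` in place identically (zeroing the counted cells after the scan); the equivalence
-- proved here is about the RETURN value.

-- ===== PORT A =====
def pvCellA (d : List (List Int)) (r c : Int) : Int :=
  PySem.List.pyGetD (PySem.List.pyGetD d r []) c 0

def pvNbSum (d : List (List Int)) (row col : Int) : Int :=
  ((PySem.List.pyRange (-1) 2 1).flatMap (fun i =>
    (PySem.List.pyRange (-1) 2 1).map (fun j => pvCellA d (row + i) (col + j)))).sum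

def count_accessible_paper (diagram : List (List Int)) : Int :=
  (((PySem.List.pyRange 1 (PySem.List.len diagram - 1) 1).foldl (fun acc row =>
    (PySem.List.pyRange 1 (PySem.List.len (PySem.List.pyGetD diagram row []) - 1) 1).foldl
      (fun acc2 col =>
        if pvCellA diagram row col = 0 then acc2
        else if pvNbSum diagram row col < 5 then acc2 ++ [(row, col)] else acc2)
      acc) ([] : List (Int × Int))).length : Int)

-- ===== PORT B =====
-- Python inner loop `for c in range(m): if c < len(row): s += row[c]; cur.append(prev[c+1]+s)`;
-- state = (cur, s)
def pvBuildRow (prev row : List Int) (m : Int) : List Int × Int :=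
  (PySem.List.pyRange 0 m 1).foldl (fun p c =>
    let s := if c < PySem.List.len row then p.2 + PySem.List.pyGetD row c 0 else p.2
    (p.1 ++ [PySem.List.pyGetD prev (c + 1) 0 + s], s)) ([0], 0)

-- Python `P = [[0]*(m+1)]; prev = P[0]; for row in diagram: … P.append(cur); prev = cur`
-- (m = max of row lengths ≥ 0 at every call, so `(m+1).toNat` models `[0]*(m+1)` exactly)
def pvBuildP (diagram : List (List Int)) (m : Int) : List (List Int) × List Int :=
  diagram.foldl (fun st row =>
    let cur := (pvBuildRow st.2 row m).1
    (st.1 ++ [cur], cur))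
    ([List.replicate (m + 1).toNat 0], List.replicate (m + 1).toNat 0)

def count_accessible_paper_alt (diagram : List (List Int)) : Int :=
  let n : Int := PySem.List.len diagram
  -- Python `m = max(map(len, diagram), default=0)`
  let m : Int := PySem.List.maxD (diagram.map (fun row => PySem.List.len row)) (fun x => x) 0
  let P := (pvBuildP diagram m).1
  let acc := (PySem.List.pyRange 1 (n - 1) 1).foldl (fun a r =>
    let row := PySem.List.pyGetD diagram r []
    (PySem.List.pyRange 1 (PySem.List.len row - 1) 1).foldl (fun a2 c =>
      if PySem.List.pyGetD row c 0 = 0 then a2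
      else if PySem.List.pyGetD (PySem.List.pyGetD P (r + 2) []) (c + 2) 0
             - PySem.List.pyGetD (PySem.List.pyGetD P (r - 1) []) (c + 2) 0
             - PySem.List.pyGetD (PySem.List.pyGetD P (r + 2) []) (c - 1) 0
             + PySem.List.pyGetD (PySem.List.pyGetD P (r - 1) []) (c - 1) 0 < 5
      then a2 ++ [(r, c)] else a2) a) ([] : List (Int × Int))
  (acc.length : Int)

-- ===== PRECONDITION & SPEC =====
-- Pre_ excludes exactly the inputs on which A raises IndexError: jagged diagrams where the 3×3
-- window of some scanned nonzero interior cell overhangs a shorter neighboring row.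
def Pre_count_accessible_paper (diagram : List (List Int)) : Prop :=
  ∀ r ∈ List.range diagram.length, 1 ≤ r → r + 1 < diagram.length →
    ∀ c ∈ List.range (diagram.getD r []).length, 1 ≤ c → c + 1 < (diagram.getD r []).length →
      (diagram.getD r []).getD c 0 ≠ 0 →
        c + 2 ≤ (diagram.getD (r - 1) []).length ∧ c + 2 ≤ (diagram.getD (r + 1) []).length
instance (diagram : List (List Int)) : Decidable (Pre_count_accessible_paper diagram) := by
  unfold Pre_count_accessible_paper; infer_instance

def pvWitness_count_accessible_paper : List (List Int) :=
  [[1, 2, 1], [0, 1, 0], [1, 0, 1]]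

def Spec_count_accessible_paper (diagram : List (List Int)) (out : Int) : Prop := out = count_accessible_paper_alt diagram
instance (diagram : List (List Int)) (out : Int) : Decidable (Spec_count_accessible_paper diagram out) := by unfold Spec_count_accessible_paper; infer_instance

-- ===== CLAIM (what is proved, stated in full; the proofs are below) =====
def Claim_equal_count_accessible_paper : Prop := ∀ (diagram : List (List Int)), Dom_count_accessible_paper diagram → Pre_count_accessible_paper diagram → Spec_count_accessible_paper diagram (count_accessible_paper diagram)
-- ===== LEMMAS AND PROOFS =====

theorem pvTakeSuccSum (xs : List Int) (n : Nat) :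
    (xs.take (n+1)).sum = (xs.take n).sum + xs.getD n 0 := by
  rw [List.take_add_one, List.sum_append, List.getD_eq_getElem?_getD]
  cases h : xs[n]? <;> simp

theorem pvTakeSuccMapSum (g : List Int → Int) (d : List (List Int)) (a : Nat) (h : a < d.length) :
    ((d.take (a+1)).map g).sum = ((d.take a).map g).sum + g (d.getD a []) := by
  rw [List.take_add_one, List.getElem?_eq_getElem h, List.map_append, List.sum_append,
    List.getD_eq_getElem _ _ h]
  simp

theorem pvBuildRow_spec (prev row : List Int) (m : Nat) :
    pvBuildRow prev row (m : Int) =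
      (0 :: (List.range m).map (fun c => PySem.List.pyGetD prev (Int.ofNat c + 1) 0 + (row.take (c + 1)).sum),
       (row.take m).sum) := by
  induction m with
  | zero => simp [pvBuildRow, PySem.List.pyRange_one_eq_nil]
  | succ k ih =>
      have h : PySem.List.pyRange 0 ((k+1 : Nat) : Int) 1 =
          PySem.List.pyRange 0 (k : Int) 1 ++ [(k : Int)] := by
        push_cast
        exact PySem.List.pyRange_one_succ_right (by positivity)
      unfold pvBuildRow at ih ⊢
      rw [h, List.foldl_append, ih]
      simp only [List.foldl_cons, List.foldl_nil, List.range_succ, List.map_append, List.map_cons,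
        List.map_nil]
      have hs : (if ((k : Nat) : Int) < PySem.List.len row
            then (row.take k).sum + PySem.List.pyGetD row ((k : Nat) : Int) 0
            else (row.take k).sum) = (row.take (k + 1)).sum := by
        rw [pvTakeSuccSum row k]
        split_ifs with hlt
        · rw [PySem.List.pyGetD_natCast row]
        · rw [List.getD_eq_default _ _ (by simp [PySem.List.len] at hlt; omega)]
          ring
      rw [hs]
      simp only [Int.ofNat_eq_natCast, List.cons_append]


def pvTableRow (d : List (List Int)) (m r : Nat) : List Int :=
  0 :: (List.range m).map (fun c => ((d.take r).map (fun row => (row.take (c + 1)).sum)).sum)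

theorem pvTableRow_take (d0 : List (List Int)) (row : List Int) (m r : Nat) (h : r ≤ d0.length) :
    pvTableRow (d0 ++ [row]) m r = pvTableRow d0 m r := by
  unfold pvTableRow
  rw [List.take_append_of_le_length h]

theorem pvTableRow_snoc (d0 : List (List Int)) (row : List Int) (m : Nat) :
    pvTableRow (d0 ++ [row]) m (d0.length + 1) =
      0 :: (List.range m).map (fun c =>
        PySem.List.pyGetD (pvTableRow d0 m d0.length) (Int.ofNat c + 1) 0 + (row.take (c + 1)).sum) := by
  unfold pvTableRow
  congr 1
  apply List.map_congr_left
  intro c hc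
  rw [List.mem_range] at hc
  rw [show (Int.ofNat c + 1) = ((c + 1 : Nat) : Int) by simp, PySem.List.pyGetD_natCast,
    List.getD_cons_succ, PySem.List.getD_map_range _ _ _ _ hc, List.take_length,
    List.take_of_length_le (by simp)]
  simp

theorem pvBuildP_spec (d : List (List Int)) (m : Nat) :
    pvBuildP d (m : Int) =
      ((List.range (d.length + 1)).map (pvTableRow d m), pvTableRow d m d.length) := by
  induction d using List.reverseRecOn with
  | nil =>
      simp [pvBuildP, pvTableRow, List.replicate_succ]
  | append_singleton d0 row ih =>
      unfold pvBuildP at ih ⊢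
      rw [List.foldl_append, ih]
      simp only [List.foldl_cons, List.foldl_nil]
      rw [pvBuildRow_spec]
      apply Prod.ext
      case fst =>
        symm
        show List.map (pvTableRow (d0 ++ [row]) m) (List.range ((d0 ++ [row]).length + 1)) = _
        rw [List.length_append, List.length_singleton, List.range_succ, List.map_append,
          List.map_singleton, pvTableRow_snoc]
        congr 1
        apply List.map_congr_left
        intro r hr
        rw [List.mem_range] at hr
        exact pvTableRow_take d0 row m r (by omega)
      case snd =>
        symm
        show pvTableRow (d0 ++ [row]) m (d0 ++ [row]).length = _
        rw [List.length_append, List.length_singleton, pvTableRow_snoc]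


theorem pvTableRow_getD (d : List (List Int)) (m r j : Nat) (hj : j ≤ m) :
    PySem.List.pyGetD (pvTableRow d m r) (j : Int) 0 =
      ((d.take r).map (fun row => (row.take j).sum)).sum := by
  cases j with
  | zero => simp [pvTableRow]
  | succ c =>
      unfold pvTableRow
      rw [PySem.List.pyGetD_natCast, List.getD_cons_succ,
        PySem.List.getD_map_range _ _ _ _ (by omega)]

theorem pvTakeThree (g : List Int → Int) (d : List (List Int)) (r : Nat) (h : r + 3 ≤ d.length) :
    ((d.take (r + 3)).map g).sum =
      ((d.take r).map g).sum + g (d.getD r []) + g (d.getD (r+1) []) + g (d.getD (r+2) []) := by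
  have h1 : ((d.take (r + 3)).map g).sum = _ := pvTakeSuccMapSum g d (r+2) (by omega)
  have h2 : ((d.take (r + 2)).map g).sum = _ := pvTakeSuccMapSum g d (r+1) (by omega)
  have h3 : ((d.take (r + 1)).map g).sum = _ := pvTakeSuccMapSum g d r (by omega)
  rw [h1, h2, h3]

theorem pvRowWin (row : List Int) (k : Nat) :
    (row.take (k + 3)).sum =
      (row.take k).sum + row.getD k 0 + row.getD (k+1) 0 + row.getD (k+2) 0 := by
  have h1 : (row.take (k + 3)).sum = _ := pvTakeSuccSum row (k+2)
  have h2 : (row.take (k + 2)).sum = _ := pvTakeSuccSum row (k+1)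
  rw [h1, h2, pvTakeSuccSum row k]


theorem pvFoldlMaxCast (l : List (List Int)) (x : Nat) :
    (l.map (fun row => PySem.List.len row)).foldl max ((x : Nat) : Int) =
      ((l.foldl (fun a row => max a row.length) x : Nat) : Int) := by
  induction l generalizing x with
  | nil => rfl
  | cons b t ih =>
      simp only [List.map_cons, List.foldl_cons, PySem.List.len, ← Nat.cast_max]
      exact ih (max x b.length)

theorem pvMaxD_cast (d : List (List Int)) :
    PySem.List.maxD (d.map (fun row => PySem.List.len row)) (fun x => x) 0 =
      ((d.foldl (fun a row => max a row.length) 0 : Nat) : Int) := by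
  cases d with
  | nil => rfl
  | cons a t =>
      simp only [List.map_cons, PySem.List.maxD, PySem.List.max?_id_cons, List.foldl_cons]
      have h0 : (PySem.List.len a : Int) = ((a.length : Nat) : Int) := by simp [PySem.List.len]
      rw [h0, pvFoldlMaxCast t a.length, show max 0 a.length = a.length from Nat.zero_max _]
      rfl

-- ===== VERDICT (by name: the statement is the Claim_ definition above) =====
theorem count_accessible_paper_spec : Claim_equal_count_accessible_paper := by
  intro d _ hpre
  unfold Spec_count_accessible_paper count_accessible_paper count_accessible_paper_alt
  dsimp only
  by_cases hn3 : 3 ≤ d.length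
  case neg =>
    rw [PySem.List.pyRange_one_eq_nil
      (show PySem.List.len d - 1 ≤ 1 by simp [PySem.List.len]; omega)]
    rfl
  case pos =>
    rw [pvMaxD_cast d, pvBuildP_spec d (d.foldl (fun a row => max a row.length) 0)]
    dsimp only
    congr 2
    apply PySem.List.foldl_congr_mem
    intro acc row hrow
    rw [PySem.List.mem_pyRange_one] at hrow
    obtain ⟨r, rfl⟩ : ∃ n : Nat, row = (n : Int) + 1 := ⟨(row - 1).toNat, by omega⟩
    have hlen : PySem.List.len d = (d.length : Int) := by simp [PySem.List.len]
    rw [hlen] at hrow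
    have hr3 : r + 3 ≤ d.length := by omega
    have hrowget : PySem.List.pyGetD d ((r : Int) + 1) [] = d.getD (r + 1) [] := by
      rw [show ((r : Int) + 1) = ((r + 1 : Nat) : Int) by push_cast; ring,
        PySem.List.pyGetD_natCast]
    rw [hrowget]
    apply PySem.List.foldl_congr_mem
    intro acc2 col hcol
    rw [PySem.List.mem_pyRange_one] at hcol
    obtain ⟨k, rfl⟩ : ∃ n : Nat, col = (n : Int) + 1 := ⟨(col - 1).toNat, by omega⟩
    have hLk : k + 2 < (d.getD (r + 1) []).length := by
      simp only [PySem.List.len] at hcol; omega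
    have hk3 : k + 3 ≤ d.foldl (fun a row => max a row.length) 0 := by
      have hmem : d.getD (r + 1) [] ∈ d := by
        rw [List.getD_eq_getElem _ _ (by omega : r + 1 < d.length)]
        exact List.getElem_mem _
      have hle := (PySem.List.le_foldl_max_nat d (fun row => row.length) 0).2 _ hmem
      omega
    simp only [pvCellA, hrowget]
    have hP : ∀ (a : Nat), a < d.length + 1 →
        PySem.List.pyGetD ((List.range (d.length + 1)).map
            (pvTableRow d (d.foldl (fun a row => max a row.length) 0)))
          ((a : Int)) [] = pvTableRow d (d.foldl (fun a row => max a row.length) 0) a := by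
      intro a ha
      rw [PySem.List.pyGetD_natCast, PySem.List.getD_map_range _ _ _ _ ha]
    have hkey : pvNbSum d ((r : Int) + 1) ((k : Int) + 1) =
        PySem.List.pyGetD (PySem.List.pyGetD ((List.range (d.length + 1)).map (pvTableRow d (d.foldl (fun a row => max a row.length) 0))) ((r : Int) + 1 + 2) []) ((k : Int) + 1 + 2) 0
        - PySem.List.pyGetD (PySem.List.pyGetD ((List.range (d.length + 1)).map (pvTableRow d (d.foldl (fun a row => max a row.length) 0))) ((r : Int) + 1 - 1) []) ((k : Int) + 1 + 2) 0
        - PySem.List.pyGetD (PySem.List.pyGetD ((List.range (d.length + 1)).map (pvTableRow d (d.foldl (fun a row => max a row.length) 0))) ((r : Int) + 1 + 2) []) ((k : Int) + 1 - 1) 0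
        + PySem.List.pyGetD (PySem.List.pyGetD ((List.range (d.length + 1)).map (pvTableRow d (d.foldl (fun a row => max a row.length) 0))) ((r : Int) + 1 - 1) []) ((k : Int) + 1 - 1) 0 := by
      rw [show ((r : Int) + 1 + 2) = ((r + 3 : Nat) : Int) by push_cast; ring,
        show ((r : Int) + 1 - 1) = ((r : Nat) : Int) by ring,
        show ((k : Int) + 1 + 2) = ((k + 3 : Nat) : Int) by push_cast; ring,
        show ((k : Int) + 1 - 1) = ((k : Nat) : Int) by ring,
        hP (r + 3) (by omega), hP r (by omega),
        pvTableRow_getD d _ (r + 3) (k + 3) hk3,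
        pvTableRow_getD d _ (r + 3) k (by omega),
        pvTableRow_getD d _ r (k + 3) hk3,
        pvTableRow_getD d _ r k (by omega)]
      have h3 : ((d.take (r + 3)).map (fun row => (row.take (k + 3)).sum)).sum = _ :=
        pvTakeThree (fun row => (row.take (k + 3)).sum) d r hr3
      have h0 : ((d.take (r + 3)).map (fun row => (row.take k).sum)).sum = _ :=
        pvTakeThree (fun row => (row.take k).sum) d r hr3
      rw [h3, h0]
      simp only []
      rw [pvRowWin (d.getD r []) k, pvRowWin (d.getD (r + 1) []) k,
        pvRowWin (d.getD (r + 2) []) k]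
      have hrg : PySem.List.pyRange (-1) 2 1 = [-1, 0, 1] := by decide
      simp only [pvNbSum, hrg, List.flatMap_cons, List.map_cons, List.map_nil,
        List.flatMap_nil, List.append_nil, List.sum_append, List.sum_cons, List.sum_nil, pvCellA]
      rw [show ((r : Int) + 1 + -1) = ((r : Nat) : Int) by ring,
        show ((r : Int) + 1 + 0) = ((r + 1 : Nat) : Int) by push_cast; ring,
        show ((r : Int) + 1 + 1) = ((r + 2 : Nat) : Int) by push_cast; ring,
        show ((k : Int) + 1 + -1) = ((k : Nat) : Int) by ring,
        show ((k : Int) + 1 + 0) = ((k + 1 : Nat) : Int) by push_cast; ring,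
        show ((k : Int) + 1 + 1) = ((k + 2 : Nat) : Int) by push_cast; ring]
      simp only [PySem.List.pyGetD_natCast]
      ring
    rw [hkey]
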